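-- pv_equiv track=rewrite | github.com/ksalsw1996/cs402_cw2 | parse.py | bin_divide
-- ===== SOURCE A (Python) =====
-- bin_op = ['&', '|', '>', '<', '=']
--
-- uni_op = ['-']
--
-- def bin_divide(a):
--     token = a.pop(0)
--     first = [token]
--     if token in bin_op:
--         val = 2
--     elif token in uni_op:
--         val = 1
--     else:
--         return (first, a)
--     for i in range(len(a)):
--         token = a.pop(0)
--         first.append(token)
--         if token in bin_op:
--             val += 1
--         elif token not in uni_op:
--             val -= 1
--         if val == 0:
--             return (first, a)
-- ===== SOURCE B (Python) =====
-- bin_op = ['&', '|', '>', '<', '=']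
--
-- uni_op = ['-']
--
-- def bin_divide(a):
--     # recursive-descent: consume one prefix subexpression into `first`,
--     # popping `a` in place; None (with `a` drained) if tokens run out.
--     first = []
--     def parse():
--         if not a:
--             return False
--         tok = a.pop(0)
--         first.append(tok)
--         if tok in bin_op:
--             return parse() and parse()
--         if tok in uni_op:
--             return parse()
--         return True
--     if parse():
--         return (first, a)
--     return None
-- ===== Notes on version B (the rewrite author's own statement) =====
-- stated objective: alternative
-- what changed: Replaces A's pop-and-count loop (an integer counter of pending operands with early return) by a recursive-descent parser that consumes one subexpression per call (two recursive calls after a binary operator, one after a unary one); Pre_ excludes only the empty list, on which A raises IndexError.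
import Mathlib
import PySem

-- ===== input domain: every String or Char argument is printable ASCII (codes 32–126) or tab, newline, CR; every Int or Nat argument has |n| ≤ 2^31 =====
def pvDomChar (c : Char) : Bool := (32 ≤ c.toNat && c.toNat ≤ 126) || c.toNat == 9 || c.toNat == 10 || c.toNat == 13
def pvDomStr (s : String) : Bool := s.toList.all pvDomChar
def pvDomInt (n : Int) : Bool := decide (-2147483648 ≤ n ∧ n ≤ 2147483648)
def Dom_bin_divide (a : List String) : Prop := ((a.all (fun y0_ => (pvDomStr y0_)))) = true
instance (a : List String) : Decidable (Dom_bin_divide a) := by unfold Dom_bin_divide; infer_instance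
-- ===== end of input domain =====

-- B replaces A's operand-counting loop by a recursive-descent parser (alternative
-- decomposition, same cost). Both Pythons pop `a` in place; the equivalence proved
-- here is about the RETURN value only (the final mutated state of `a` coincides too,
-- but that is not part of the statement).

-- ===== PORT A =====
def bin_op : List String := ["&", "|", ">", "<", "="]

def uni_op : List String := ["-"]

-- A's `for i in range(len(a))` pops one token per iteration, exactly len(a) times
-- with early return; ported as the obvious structural recursion over the list.
def bin_divide_loop (a first : List String) (val : Int) : Option (List String × List String) :=
  match a with
  | [] => none                         -- loop finished without val == 0: Python falls off, returns None
  | token :: rest =>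
    let first := first ++ [token]
    let val := if bin_op.contains token then val + 1
               else if uni_op.contains token then val
               else val - 1
    if val = 0 then some (first, rest) else bin_divide_loop rest first val

def bin_divide (a : List String) : Option (List String × List String) :=
  match a with
  | [] => none                         -- Python raises IndexError here; excluded by Pre_
  | token :: rest =>
    if bin_op.contains token then bin_divide_loop rest [token] 2
    else if uni_op.contains token then bin_divide_loop rest [token] 1
    else some ([token], rest)

-- ===== PORT B =====
-- B's nested `parse()` pops tokens off the shared list; ported by threading
-- (first, a) through the recursion. The Nat argument is a totality guard (fuel);
-- a.length suffices since every call consumes at least one token.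
def parseB : Nat → List String → List String → Option (List String × List String)
  | 0, _, _ => none
  | fuel+1, first, a =>
    match a with
    | [] => none                       -- `if not a: return False`
    | tok :: rest =>
      let first := first ++ [tok]
      if bin_op.contains tok then
        match parseB fuel first rest with
        | none => none
        | some (f, r) => parseB fuel f r
      else if uni_op.contains tok then parseB fuel first rest
      else some (first, rest)

def bin_divide_alt (a : List String) : Option (List String × List String) :=
  parseB a.length [] a

-- ===== PRECONDITION & SPEC =====
-- Pre_ excludes exactly the empty list, on which A raises IndexError.
def Pre_bin_divide (a : List String) : Prop := a ≠ []
instance (a : List String) : Decidable (Pre_bin_divide a) := by unfold Pre_bin_divide; infer_instance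

def pvWitness_bin_divide : List String := ["&", "x", "y"]

def Spec_bin_divide (a : List String) (out : Option (List String × List String)) : Prop := out = bin_divide_alt a
instance (a : List String) (out : Option (List String × List String)) : Decidable (Spec_bin_divide a out) := by unfold Spec_bin_divide; infer_instance

-- ===== CLAIM (what is proved, stated in full; the proofs are below) =====
def Claim_equal_bin_divide : Prop := ∀ (a : List String), Dom_bin_divide a → Pre_bin_divide a → Spec_bin_divide a (bin_divide a)

-- ===== LEMMAS AND PROOFS =====

-- a successful parse leaves a suffix no longer than its input
theorem parseB_rem : ∀ (fuel : Nat) (first a f r : List String),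
    parseB fuel first a = some (f, r) → r.length ≤ a.length := by
  intro fuel
  induction fuel with
  | zero => intro first a f r h; simp [parseB] at h
  | succ n ih =>
    intro first a f r h
    match a with
    | [] => simp [parseB] at h
    | tok :: rest =>
      simp only [parseB] at h
      by_cases hb : bin_op.contains tok = true
      · rw [if_pos hb] at h
        cases h1 : parseB n (first ++ [tok]) rest with
        | none => rw [h1] at h; simp at h
        | some p =>
          obtain ⟨f1, r1⟩ := p
          rw [h1] at h
          have h2 := ih _ _ _ _ h1
          have h3 := ih _ _ _ _ h
          simp only [List.length_cons]; omega
      · rw [if_neg hb] at h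
        by_cases hu : uni_op.contains tok = true
        · rw [if_pos hu] at h
          have := ih _ _ _ _ h
          simp only [List.length_cons]; omega
        · rw [if_neg hu] at h
          simp only [Option.some.injEq, Prod.mk.injEq] at h
          simp [← h.2]

-- fuel does not matter as long as it covers the list length
theorem parseB_fuel : ∀ (f1 f2 : Nat) (first a : List String),
    a.length ≤ f1 → a.length ≤ f2 → parseB f1 first a = parseB f2 first a := by
  intro f1
  induction f1 with
  | zero =>
    intro f2 first a h1 h2
    have : a = [] := by cases a <;> simp_all
    subst this
    cases f2 <;> simp [parseB]
  | succ n ih =>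
    intro f2 first a h1 h2
    match a with
    | [] => cases f2 <;> simp [parseB]
    | tok :: rest =>
      match f2 with
      | 0 => simp at h2
      | m+1 =>
        simp only [parseB]
        by_cases hb : bin_op.contains tok = true
        · rw [if_pos hb, if_pos hb]
          have hrest : parseB n (first ++ [tok]) rest = parseB m (first ++ [tok]) rest := by
            apply ih <;> simp only [List.length_cons] at h1 h2 <;> omega
          rw [hrest]
          cases h1' : parseB m (first ++ [tok]) rest with
          | none => rfl
          | some p =>
            obtain ⟨f, r⟩ := p
            have hr : r.length ≤ rest.length := parseB_rem _ _ _ _ _ h1'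
            apply ih <;> simp only [List.length_cons] at h1 h2 <;> omega
        · rw [if_neg hb, if_neg hb]
          by_cases hu : uni_op.contains tok = true
          · rw [if_pos hu, if_pos hu]
            apply ih <;> simp only [List.length_cons] at h1 h2 <;> omega
          · rw [if_neg hu, if_neg hu]

-- parse `k` consecutive subexpressions
def parseMany : Nat → List String → List String → Option (List String × List String)
  | 0, first, a => some (first, a)
  | k+1, first, a =>
    match parseB a.length first a with
    | none => none
    | some (f, r) => parseMany k f r

theorem parseMany_one (f r : List String) : parseMany 1 f r = parseB r.length f r := by
  simp only [parseMany]
  cases h : parseB r.length f r with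
  | none => rfl
  | some p => obtain ⟨f2, r2⟩ := p; rfl

-- A's counter loop with pending count k+1 = parsing k+1 subexpressions
theorem loop_eq_parseMany : ∀ (a first : List String) (k : Nat),
    bin_divide_loop a first ((k : Int) + 1) = parseMany (k+1) first a := by
  intro a
  induction a with
  | nil => intro first k; simp [bin_divide_loop, parseMany, parseB]
  | cons tok rest ih =>
    intro first k
    simp only [bin_divide_loop, parseMany, List.length_cons, parseB]
    by_cases hb : bin_op.contains tok = true
    · rw [if_pos hb, if_pos hb]
      have hne : ¬ (((k : Int) + 1) + 1 = 0) := by omega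
      rw [if_neg hne]
      have hval : ((k : Int) + 1) + 1 = ((k+1 : Nat) : Int) + 1 := by push_cast; ring
      rw [hval, ih]
      simp only [parseMany]
      cases h1 : parseB rest.length (first ++ [tok]) rest with
      | none => rfl
      | some p =>
        obtain ⟨f, r⟩ := p
        have hr : r.length ≤ rest.length := parseB_rem _ _ _ _ _ h1
        have hfr := parseB_fuel r.length rest.length f r (le_refl _) hr
        simp [hfr]
    · rw [if_neg hb, if_neg hb]
      by_cases hu : uni_op.contains tok = true
      · rw [if_pos hu, if_pos hu]
        have hne : ¬ (((k : Int) + 1) = 0) := by omega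
        rw [if_neg hne, ih]
        simp [parseMany]
      · rw [if_neg hu, if_neg hu]
        have hval : ((k : Int) + 1) - 1 = (k : Int) := by ring
        rw [hval]
        match k with
        | 0 => simp [parseMany]
        | j+1 =>
          have hne : ¬ (((j+1 : Nat) : Int) = 0) := by push_cast; omega
          rw [if_neg hne]
          have hc : ((j+1 : Nat) : Int) = ((j : Nat) : Int) + 1 := by push_cast; ring
          rw [hc, ih]

-- ===== VERDICT (by name: the statement is the Claim_ definition above) =====
theorem bin_divide_spec : Claim_equal_bin_divide := by
  intro a _ hpre
  unfold Spec_bin_divide bin_divide bin_divide_alt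
  match a with
  | [] => exact absurd rfl hpre
  | tok :: rest =>
    simp only [List.length_cons, parseB, List.nil_append]
    by_cases hb : bin_op.contains tok = true
    · rw [if_pos hb, if_pos hb]
      have h2 : (2 : Int) = ((1 : Nat) : Int) + 1 := by norm_num
      rw [h2, loop_eq_parseMany]
      simp only [parseMany]
      cases h1 : parseB rest.length [tok] rest with
      | none => rfl
      | some p =>
        obtain ⟨f, r⟩ := p
        have hr : r.length ≤ rest.length := parseB_rem _ _ _ _ _ h1
        have hfr := parseB_fuel r.length rest.length f r (le_refl _) hr
        simp [hfr]
        cases parseB rest.length f r <;> rfl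
    · rw [if_neg hb, if_neg hb]
      by_cases hu : uni_op.contains tok = true
      · rw [if_pos hu, if_pos hu]
        have h1 : (1 : Int) = ((0 : Nat) : Int) + 1 := by norm_num
        rw [h1, loop_eq_parseMany, parseMany_one]
      · rw [if_neg hu, if_neg hu]
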